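-- pv_equiv track=rewrite | github.com/Jivnesh/SanskritShala | Neural_Modules/TransLIST/constrained_inference.py | position_corrector
-- ===== SOURCE A (Python) =====
-- def position_corrector(pos,w,chunk):
--
-- 	max_pos = 0
-- 	max_match = 0
--
-- 	for i in range(len(chunk)):
-- 		k = i
-- 		match = 0
-- 		for j in range(len(w)):
-- 			if chunk[k] == w[j]: match += 1
-- 			k += 1
-- 			if (k>len(chunk)-1) : break
-- 		if match > max_match :
-- 			max_match = match
-- 			max_pos = i
--
-- 	if max_match == 0 : return -1
--
-- 	best_pos = max_pos
-- 	min_dist = abs(best_pos - pos)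
-- 	for i in range(len(chunk)):
-- 		k = i
-- 		match = 0
-- 		for j in range(len(w)):
-- 			if chunk[k] == w[j]: match += 1
-- 			k += 1
-- 			if (k>len(chunk)-1) : break
-- 		if match == max_match :
-- 			if abs(i-pos) < min_dist:
-- 				min_dist = abs(i-pos)
-- 				best_pos = i
--
-- 	return best_pos
-- ===== SOURCE B (Python) =====
-- def position_corrector(pos, w, chunk):
--     n = len(chunk)
--     # inverted index: token -> list of its positions in chunk
--     index = {}
--     for k, tok in enumerate(chunk):
--         index.setdefault(tok, []).append(k)
--     # voting: each occurrence of w[j] at position k casts a vote for offset k - j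
--     counts = [0] * n
--     for j, tok in enumerate(w):
--         for k in index.get(tok, ()):
--             if k >= j:
--                 counts[k - j] += 1
--     # single lexicographic selection: more votes wins; on equal positive votes,
--     # smaller abs(i - pos) wins; ties keep the earlier offset
--     best, best_count, best_dist = -1, 0, 0
--     for i in range(n):
--         c = counts[i]
--         if c > best_count or (c == best_count and c > 0 and abs(i - pos) < best_dist):
--             best, best_count, best_dist = i, c, abs(i - pos)
--     return best
-- ===== Notes on version B (the rewrite author's own statement) =====
-- stated objective: alternative
-- what changed: B builds an inverted index (dict token -> positions in chunk) once, lets every occurrence of w[j] at position k vote for offset k-j in a counts table, and picks the winner in ONE lexicographic scan (count, then distance to pos, then first index), instead of A's two passes that each rescan a window of chunk for every offset.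
import Mathlib
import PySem

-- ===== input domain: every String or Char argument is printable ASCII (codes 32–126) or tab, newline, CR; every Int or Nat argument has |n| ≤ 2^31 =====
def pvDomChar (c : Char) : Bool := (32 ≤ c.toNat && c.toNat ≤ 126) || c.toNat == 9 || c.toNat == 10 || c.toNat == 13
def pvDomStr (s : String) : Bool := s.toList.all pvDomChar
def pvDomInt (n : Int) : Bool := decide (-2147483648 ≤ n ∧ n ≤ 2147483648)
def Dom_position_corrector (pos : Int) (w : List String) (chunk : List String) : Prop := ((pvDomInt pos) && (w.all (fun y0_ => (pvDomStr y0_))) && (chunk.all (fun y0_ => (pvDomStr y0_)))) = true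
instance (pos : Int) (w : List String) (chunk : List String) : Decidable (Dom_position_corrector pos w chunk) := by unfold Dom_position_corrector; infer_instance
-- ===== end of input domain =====

-- B replaces A's two window-scanning passes by an inverted index (token -> positions) whose
-- occurrence lists vote for offsets, followed by ONE lexicographic selection scan.

-- ===== PORT A =====
-- inner 'for j in range(len(w))' loop of A, with its mid-loop break after 'k += 1';
-- chunk[k] is only read with k in range (the break guarantees it), so getD is exact there
def pcInner (chunk : List String) (ws : List String) (k : Nat) (m : Nat) : Nat :=
  match ws with
  | [] => m
  | wj :: rest =>
    let m' := if chunk.getD k "" == wj then m + 1 else m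
    let k' := k + 1
    if k' > chunk.length - 1 then m' else pcInner chunk rest k' m'

def position_corrector (pos : Int) (w : List String) (chunk : List String) : Int :=
  -- first pass: running (max_pos, max_match) with strict improvement
  let s1 := (List.range chunk.length).foldl (fun (st : Nat × Nat) i =>
      let mt := pcInner chunk w i 0
      if mt > st.2 then (i, mt) else st) (0, 0)
  if s1.2 = 0 then -1
  else
    -- second pass: (best_pos, min_dist), replacing only on strictly smaller distance
    let s2 := (List.range chunk.length).foldl (fun (st : Nat × Int) i =>
        let mt := pcInner chunk w i 0
        if mt = s1.2 then
          (if |(i : Int) - pos| < st.2 then (i, |(i : Int) - pos|) else st)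
        else st) (s1.1, |(s1.1 : Int) - pos|)
    (s2.1 : Int)

-- ===== PORT B =====
-- Source B's inverted index: 'index.setdefault(tok, []).append(k)' = modify tok [] (· ++ [k])
def pcIndexOf (chunk : List String) : PySem.Dict String (List Int) :=
  (PySem.List.enumerate chunk 0).foldl
    (fun d p => d.modify p.2 [] (· ++ [p.1])) PySem.Dict.empty

-- Source B's voting pass: every occurrence k of w[j] (with k >= j) does counts[k-j] += 1;
-- 0 <= k - j is guaranteed by the guard, so pySetD/pyGetD are exact
def pcVotes (w : List String) (chunk : List String) : List Int :=
  (PySem.List.enumerate w 0).foldl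
    (fun counts q =>
      ((pcIndexOf chunk).getD q.2 []).foldl
        (fun counts k =>
          if k ≥ q.1 then
            PySem.List.pySetD counts (k - q.1) (PySem.List.pyGetD counts (k - q.1) 0 + 1)
          else counts) counts)
    (List.replicate chunk.length 0)

def position_corrector_alt (pos : Int) (w : List String) (chunk : List String) : Int :=
  let counts := pcVotes w chunk
  -- single selection scan over range(n); counts[i] is in range (i < n)
  let sel := (List.range chunk.length).foldl
    (fun (st : Int × Int × Int) i =>
      let c := counts.getD i 0
      if c > st.2.1 ∨ (c = st.2.1 ∧ c > 0 ∧ |(i : Int) - pos| < st.2.2) then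
        ((i : Int), c, |(i : Int) - pos|)
      else st) (-1, 0, 0)
  sel.1

-- ===== PRECONDITION & SPEC =====
def Spec_position_corrector (pos : Int) (w : List String) (chunk : List String) (out : Int) : Prop := out = position_corrector_alt pos w chunk
instance (pos : Int) (w : List String) (chunk : List String) (out : Int) : Decidable (Spec_position_corrector pos w chunk out) := by unfold Spec_position_corrector; infer_instance

-- ===== CLAIM (what is proved, stated in full; the proofs are below) =====
def Claim_equal_position_corrector : Prop := ∀ (pos : Int) (w : List String) (chunk : List String), Dom_position_corrector pos w chunk → Spec_position_corrector pos w chunk (position_corrector pos w chunk)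

-- ===== LEMMAS AND PROOFS =====

-- the common mathematical count: matches of w against chunk at offset i (truncated window)
def pcCount (w : List String) (chunk : List String) (i : Nat) : Nat :=
  (List.range (min w.length (chunk.length - i))).countP
    (fun j => chunk.getD (i + j) "" == w.getD j "")

-- ---------- A-side characterization ----------

-- A's inner loop counts matches over the truncated window, i.e. computes pcCount
theorem pcInner_eq (chunk : List String) (ws : List String) :
    ∀ (k m : Nat), k < chunk.length →
      pcInner chunk ws k m =
        m + (List.range (min ws.length (chunk.length - k))).countP
          (fun j => chunk.getD (k + j) "" == ws.getD j "") := by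
  induction ws with
  | nil => intro k m hk; simp [pcInner]
  | cons wj rest ih =>
    intro k m hk
    rw [pcInner]
    by_cases hbr : k + 1 > chunk.length - 1
    · have h1 : chunk.length - k = 1 := by omega
      simp only [if_pos hbr, h1]
      have hmin : min (rest.length + 1) 1 = 1 := by omega
      simp only [List.length_cons, hmin]
      simp [List.countP_cons]
      split_ifs <;> omega
    · have hk1 : k + 1 < chunk.length := by omega
      have h2 : min (rest.length + 1) (chunk.length - k)
          = min rest.length (chunk.length - (k + 1)) + 1 := by omega
      simp only [if_neg hbr]
      rw [ih (k + 1) _ hk1]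
      simp only [List.length_cons, h2, List.range_succ_eq_map, List.countP_cons,
        List.countP_map]
      have hfun : ∀ j : Nat,
          (chunk.getD (k + 1 + j) "" == rest.getD j "")
            = ((fun j => chunk.getD (k + j) "" == (wj :: rest).getD j "") ∘ Nat.succ) j := by
        intro j
        simp only [Function.comp]
        have : k + (j + 1) = k + 1 + j := by omega
        rw [List.getD_cons_succ, this]
      rw [List.countP_congr (fun j _ => by rw [hfun j])]
      simp
      split_ifs <;> omega

-- second component of A's first pass is the running max
theorem foldl_f1_snd (c : Nat → Nat) :
    ∀ (l : List Nat) (st : Nat × Nat),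
      (l.foldl (fun (st : Nat × Nat) i => if c i > st.2 then (i, c i) else st) st).2
        = l.foldl (fun a i => max a (c i)) st.2 := by
  intro l
  induction l with
  | nil => intro st; rfl
  | cons a l ih =>
    intro st
    simp only [List.foldl_cons]
    by_cases h : c a > st.2
    · rw [if_pos h, ih]
      have : max st.2 (c a) = c a := by omega
      rw [this]
    · rw [if_neg h, ih]
      have : max st.2 (c a) = st.2 := by omega
      rw [this]

theorem foldl_max_init_le (c : Nat → Nat) :
    ∀ (l : List Nat) (a : Nat), a ≤ l.foldl (fun a i => max a (c i)) a := by
  intro l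
  induction l with
  | nil => intro a; exact le_refl a
  | cons x l ih =>
    intro a
    simp only [List.foldl_cons]
    exact le_trans (le_max_left a (c x)) (ih _)

theorem foldl_max_mem_le (c : Nat → Nat) :
    ∀ (l : List Nat) (a x : Nat), x ∈ l → c x ≤ l.foldl (fun a i => max a (c i)) a := by
  intro l
  induction l with
  | nil => intro a x hx; simp at hx
  | cons y l ih =>
    intro a x hx
    simp only [List.foldl_cons]
    rcases List.mem_cons.mp hx with h | h
    · subst h; exact le_trans (le_max_right a (c x)) (foldl_max_init_le c l _)
    · exact ih _ x h

-- if every count is ≤ the running max, the first pass never updates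
theorem foldl_f1_const (c : Nat → Nat) :
    ∀ (l : List Nat) (st : Nat × Nat), (∀ i ∈ l, c i ≤ st.2) →
      l.foldl (fun (st : Nat × Nat) i => if c i > st.2 then (i, c i) else st) st = st := by
  intro l
  induction l with
  | nil => intro st _; rfl
  | cons a l ih =>
    intro st h
    simp only [List.foldl_cons]
    have ha : ¬ c a > st.2 := by
      have := h a (List.mem_cons_self ..)
      omega
    rw [if_neg ha]
    exact ih st (fun i hi => h i (List.mem_cons_of_mem _ hi))

-- A's first pass ends at the FIRST offset attaining the final max
theorem foldl_f1_first (c : Nat → Nat) :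
    ∀ (l : List Nat) (st : Nat × Nat) (p M : Nat),
      l.foldl (fun (st : Nat × Nat) i => if c i > st.2 then (i, c i) else st) st = (p, M) →
      st.2 < M →
      c p = M ∧ ∃ l₁ l₂, l = l₁ ++ p :: l₂ ∧ (∀ i ∈ l₁, c i < M) := by
  intro l
  induction l with
  | nil =>
    intro st p M h hlt
    simp only [List.foldl_nil] at h
    rw [h] at hlt; omega
  | cons a l ih =>
    intro st p M h hlt
    simp only [List.foldl_cons] at h
    by_cases hca : c a > st.2
    · rw [if_pos hca] at h
      have hM : (l.foldl (fun (st : Nat × Nat) i => if c i > st.2 then (i, c i) else st)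
          ((a, c a) : Nat × Nat)).2 = M := by rw [h]
      rw [foldl_f1_snd] at hM
      have hM2 : l.foldl (fun a i => max a (c i)) (c a) = M := hM
      by_cases hlt2 : c a < M
      · obtain ⟨hcp, l₁, l₂, hdec, hsm⟩ := ih (a, c a) p M h hlt2
        exact ⟨hcp, a :: l₁, l₂, by rw [hdec]; rfl,
          fun i hi => by
            rcases List.mem_cons.mp hi with h' | h'
            · subst h'; exact hlt2
            · exact hsm i h'⟩
      · have hle : c a ≤ M := by
          have := foldl_max_init_le c l (c a); omega
        have heq : c a = M := by omega
        have hall : ∀ i ∈ l, c i ≤ c a := by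
          intro i hi
          have := foldl_max_mem_le c l (c a) i hi
          omega
        rw [foldl_f1_const c l (a, c a) hall] at h
        have hp : p = a := by cases h; rfl
        have hMa : M = c a := by cases h; rfl
        subst hp
        exact ⟨by omega, [], l, rfl, by simp⟩
    · rw [if_neg hca] at h
      obtain ⟨hcp, l₁, l₂, hdec, hsm⟩ := ih st p M h hlt
      exact ⟨hcp, a :: l₁, l₂, by rw [hdec]; rfl,
        fun i hi => by
          rcases List.mem_cons.mp hi with h' | h'
          · subst h'; omega
          · exact hsm i h'⟩

-- A's second pass over any list = min-dist first-wins fold over the filtered candidates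
theorem foldl_f2_filter (c : Nat → Nat) (M : Nat) (pos : Int) :
    ∀ (l : List Nat) (b : Nat),
      l.foldl (fun (st : Nat × Int) i =>
          if c i = M then
            (if |(i : Int) - pos| < st.2 then (i, |(i : Int) - pos|) else st)
          else st) (b, |(b : Int) - pos|)
        = (((l.filter (fun i => c i == M)).foldl
              (fun (b i : Nat) => if |(i : Int) - pos| < |(b : Int) - pos| then i else b) b),
           |(((l.filter (fun i => c i == M)).foldl
              (fun (b i : Nat) => if |(i : Int) - pos| < |(b : Int) - pos| then i else b) b : Nat) : Int) - pos|) := by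
  intro l
  induction l with
  | nil => intro b; rfl
  | cons a l ih =>
    intro b
    by_cases hca : c a = M
    · have hf : (a :: l).filter (fun i => c i == M) = a :: l.filter (fun i => c i == M) := by
        simp [hca]
      rw [hf]
      simp only [List.foldl_cons]
      rw [if_pos hca]
      by_cases hd : |(a : Int) - pos| < |(b : Int) - pos|
      · rw [if_pos hd, if_pos hd]; exact ih a
      · rw [if_neg hd, if_neg hd]; exact ih b
    · have hf : (a :: l).filter (fun i => c i == M) = l.filter (fun i => c i == M) := by
        simp [hca]
      rw [hf]
      simp only [List.foldl_cons]
      rw [if_neg hca]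
      exact ih b

-- ---------- B-side: the votes table computes pcCount ----------

-- the inverted index lists exactly the positions of each token, in order
theorem pcIndexOf_getD (chunk : List String) (t : String) :
    (pcIndexOf chunk).getD t []
      = ((List.range chunk.length).filter (fun k => chunk.getD k "" == t)).map
          (fun (k : Nat) => (k : Int)) := by
  have h1 : (pcIndexOf chunk).getD t []
      = ((((PySem.List.enumerate chunk 0).map (fun p => (p.2, p.1))).foldl
          (fun d q => d.modify q.1 [] (· ++ [q.2])) PySem.Dict.empty)).getD t [] := by
    rw [List.foldl_map]
    rfl
  rw [h1, PySem.Dict.getD_foldl_modify_append,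
    PySem.List.enumerate_eq_map_pyRange chunk "", PySem.List.len_eq,
    PySem.List.pyRange_zero_natCast]
  simp [List.map_map, List.filter_map, Function.comp_def, PySem.List.pyGetD_natCast,
    PySem.Dict.getD, PySem.Dict.get?, PySem.Dict.empty]

-- counting one position in the inverted-index list is an indicator
theorem count_positions (chunk : List String) (t : String) (m : Nat) :
    (((List.range chunk.length).filter (fun k => chunk.getD k "" == t)).map
        (fun (k : Nat) => (k : Int))).count ((m : Nat) : Int)
      = if m < chunk.length ∧ chunk.getD m "" = t then 1 else 0 := by
  rw [List.count_map_of_injective _ _ (fun a b h => by exact_mod_cast h),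
    List.Nodup.count (List.Nodup.filter _ List.nodup_range)]
  simp [List.mem_filter, List.mem_range]

-- the inner voting fold adds, at slot i, the number of occurrences of i + j in ks
theorem voteInner_getD (j : Int) :
    ∀ (ks : List Int) (L : List Int) (i : Nat), i < L.length →
      ((ks.foldl (fun L k =>
          if k ≥ j then
            PySem.List.pySetD L (k - j) (PySem.List.pyGetD L (k - j) 0 + 1)
          else L) L).getD i 0)
        = L.getD i 0 + ks.count ((i : Int) + j) := by
  intro ks
  induction ks with
  | nil => intro L i hi; simp
  | cons k ks ih =>
    intro L i hi
    simp only [List.foldl_cons, List.count_cons]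
    by_cases hk : k ≥ j
    · rw [if_pos hk]
      have hkj : (0 : Int) ≤ k - j := by omega
      have hrw : k - j = (((k - j).toNat : Nat) : Int) := (Int.toNat_of_nonneg hkj).symm
      rw [hrw, PySem.List.pySetD_natCast, PySem.List.pyGetD_natCast]
      have hlen : (L.set (k - j).toNat (L.getD (k - j).toNat 0 + 1)).length = L.length :=
        List.length_set
      rw [ih _ i (by rw [hlen]; exact hi)]
      by_cases hti : (k - j).toNat = i
      · have hk_eq : k = (i : Int) + j := by omega
        have hbeq : (k == (i : Int) + j) = true := by simp [hk_eq]
        rw [hti]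
        have hset : (L.set i (L.getD i 0 + 1)).getD i 0 = L.getD i 0 + 1 := by
          rw [List.getD_eq_getElem?_getD, List.getElem?_set_self hi]
          rfl
        rw [hset, if_pos hbeq]
        push_cast
        ring
      · have hk_ne : ¬ (k == (i : Int) + j) = true := by
          simp only [beq_iff_eq]
          intro hh; apply hti; omega
        have hset : (L.set (k - j).toNat (L.getD (k - j).toNat 0 + 1)).getD i 0
            = L.getD i 0 := by
          rw [List.getD_eq_getElem?_getD, List.getElem?_set_ne hti,
            ← List.getD_eq_getElem?_getD]
        rw [hset, if_neg hk_ne]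
        push_cast
        ring
    · rw [if_neg hk]
      rw [ih _ i hi]
      have hk_ne : ¬ (k == (i : Int) + j) = true := by
        simp only [beq_iff_eq]
        intro hh; omega
      rw [if_neg hk_ne]
      push_cast
      ring

theorem voteInner_length (j : Int) :
    ∀ (ks : List Int) (L : List Int),
      (ks.foldl (fun L k =>
          if k ≥ j then
            PySem.List.pySetD L (k - j) (PySem.List.pyGetD L (k - j) 0 + 1)
          else L) L).length = L.length := by
  intro ks
  induction ks with
  | nil => intro L; rfl
  | cons k ks ih =>
    intro L
    simp only [List.foldl_cons]
    by_cases hk : k ≥ j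
    · rw [if_pos hk, ih, PySem.List.length_pySetD]
    · rw [if_neg hk, ih]

-- window-truncation bookkeeping
theorem countP_window (n i : Nat) (p : Nat → Bool) (hi : i < n) :
    ∀ a : Nat, (List.range a).countP (fun j => decide (i + j < n) && p j)
      = (List.range (min a (n - i))).countP p := by
  intro a
  induction a with
  | zero => simp
  | succ a ih =>
    rw [List.range_succ, List.countP_append]
    by_cases h : i + a < n
    · have hmin2 : min a (n - i) = a := by omega
      have hmin : min (a + 1) (n - i) = a + 1 := by omega
      rw [hmin, List.range_succ, List.countP_append, ih, hmin2]
      simp [h]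
    · have hmin : min (a + 1) (n - i) = min a (n - i) := by omega
      rw [hmin, ih]
      simp [h]

-- the outer voting fold accumulates the shifted window indicators
theorem voteOuter (chunk : List String) :
    ∀ (ws : List String) (s : Nat) (L : List Int), L.length = chunk.length →
      ∀ i : Nat, i < chunk.length →
      ((PySem.List.enumerate ws (s : Int)).foldl
        (fun counts q =>
          ((pcIndexOf chunk).getD q.2 []).foldl
            (fun counts k =>
              if k ≥ q.1 then
                PySem.List.pySetD counts (k - q.1) (PySem.List.pyGetD counts (k - q.1) 0 + 1)
              else counts) counts) L).getD i 0
      = L.getD i 0 + ((List.range ws.length).countP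
          (fun j => decide (i + s + j < chunk.length)
            && (chunk.getD (i + s + j) "" == ws.getD j "")) : Int) := by
  intro ws
  induction ws with
  | nil => intro s L hL i hi; simp
  | cons x ws ih =>
    intro s L hL i hi
    rw [PySem.List.enumerate_cons]
    simp only [List.foldl_cons]
    have hs1 : (s : Int) + 1 = ((s + 1 : Nat) : Int) := by push_cast; ring
    set L1 := ((pcIndexOf chunk).getD x []).foldl
        (fun counts k =>
          if k ≥ (s : Int) then
            PySem.List.pySetD counts (k - (s : Int)) (PySem.List.pyGetD counts (k - (s : Int)) 0 + 1)
          else counts) L with hL1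
    have hlen1 : L1.length = L.length := voteInner_length (s : Int) _ L
    rw [hs1, ih (s + 1) L1 (hlen1.trans hL) i hi]
    have hhead : L1.getD i 0
        = L.getD i 0 + ((if i + s < chunk.length ∧ chunk.getD (i + s) "" = x then 1 else 0 : Nat) : Int) := by
      rw [hL1, voteInner_getD (s : Int) _ L i (by rw [hL]; exact hi)]
      rw [pcIndexOf_getD]
      have hm : (i : Int) + (s : Int) = ((i + s : Nat) : Int) := by push_cast; ring
      rw [hm, count_positions]
    rw [hhead]
    have hsplit : ((List.range (x :: ws).length).countP
        (fun j => decide (i + s + j < chunk.length)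
          && (chunk.getD (i + s + j) "" == (x :: ws).getD j "")) : Nat)
      = (if i + s < chunk.length ∧ chunk.getD (i + s) "" = x then 1 else 0)
        + (List.range ws.length).countP
          (fun j => decide (i + (s + 1) + j < chunk.length)
            && (chunk.getD (i + (s + 1) + j) "" == ws.getD j "")) := by
      simp only [List.length_cons, List.range_succ_eq_map, List.countP_cons, List.countP_map]
      have hshift : (List.range ws.length).countP
          ((fun j => decide (i + s + j < chunk.length)
            && (chunk.getD (i + s + j) "" == (x :: ws).getD j "")) ∘ Nat.succ)
        = (List.range ws.length).countP
          (fun j => decide (i + (s + 1) + j < chunk.length)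
            && (chunk.getD (i + (s + 1) + j) "" == ws.getD j "")) := by
        apply List.countP_congr
        intro j _
        have harith : i + s + (j + 1) = i + (s + 1) + j := by omega
        simp [Function.comp, harith]
      rw [hshift]
      have hzero : (decide (i + s + 0 < chunk.length)
          && (chunk.getD (i + s + 0) "" == (x :: ws).getD 0 "")) = true
          ↔ (i + s < chunk.length ∧ chunk.getD (i + s) "" = x) := by
        simp
      by_cases hz : i + s < chunk.length ∧ chunk.getD (i + s) "" = x
      · rw [if_pos (hzero.mpr hz), if_pos hz]
        omega
      · rw [if_neg (fun hh => hz (hzero.mp hh)), if_neg hz]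
        omega
    rw [hsplit]
    push_cast
    ring

-- the full voting pass produces pcCount
theorem pcVotes_getD (w chunk : List String) (i : Nat) (hi : i < chunk.length) :
    (pcVotes w chunk).getD i 0 = (pcCount w chunk i : Int) := by
  have h := voteOuter chunk w 0 (List.replicate chunk.length 0)
    (List.length_replicate) i hi
  simp only [Nat.cast_zero] at h
  unfold pcVotes
  rw [h, List.getD_replicate _ hi]
  have hwin : (List.range w.length).countP
      (fun j => decide (i + 0 + j < chunk.length) && (chunk.getD (i + 0 + j) "" == w.getD j ""))
    = (List.range (min w.length (chunk.length - i))).countP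
      (fun j => chunk.getD (i + j) "" == w.getD j "") := by
    have := countP_window chunk.length i (fun j => chunk.getD (i + j) "" == w.getD j "") hi w.length
    simpa using this
  rw [hwin]
  simp [pcCount]

-- ---------- B-side: the lexicographic selection scan ----------

-- second component of B's scan is the running max of the counts
theorem lexfold_snd (c : Nat → Nat) (pos : Int) :
    ∀ (l : List Nat) (st : Int × Int × Int),
      (l.foldl (fun (st : Int × Int × Int) i =>
          if ((c i : Int) > st.2.1 ∨ ((c i : Int) = st.2.1 ∧ (c i : Int) > 0 ∧ |(i : Int) - pos| < st.2.2)) then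
            ((i : Int), (c i : Int), |(i : Int) - pos|)
          else st) st).2.1
        = l.foldl (fun a i => max a ((c i : Int))) st.2.1 := by
  intro l
  induction l with
  | nil => intro st; rfl
  | cons a l ih =>
    intro st
    simp only [List.foldl_cons]
    by_cases h : ((c a : Int) > st.2.1 ∨ ((c a : Int) = st.2.1 ∧ (c a : Int) > 0 ∧ |(a : Int) - pos| < st.2.2))
    · rw [if_pos h, ih]
      have hge : st.2.1 ≤ (c a : Int) := by
        rcases h with h | ⟨h, _⟩ <;> omega
      rw [max_eq_right hge]
    · rw [if_neg h, ih]
      have hle : (c a : Int) ≤ st.2.1 := not_lt.mp (fun hh => h (Or.inl hh))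
      rw [max_eq_left hle]

-- with all counts zero B's scan never updates
theorem lexfold_zero (c : Nat → Nat) (pos : Int) :
    ∀ (l : List Nat), (∀ i ∈ l, c i = 0) →
      (l.foldl (fun (st : Int × Int × Int) i =>
          if ((c i : Int) > st.2.1 ∨ ((c i : Int) = st.2.1 ∧ (c i : Int) > 0 ∧ |(i : Int) - pos| < st.2.2)) then
            ((i : Int), (c i : Int), |(i : Int) - pos|)
          else st) ((-1 : Int), (0 : Int), (0 : Int)))
        = ((-1 : Int), (0 : Int), (0 : Int)) := by
  intro l
  induction l with
  | nil => intro _; rfl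
  | cons a l ih =>
    intro h
    have h0 : c a = 0 := h a (List.mem_cons_self ..)
    simp only [List.foldl_cons]
    rw [if_neg (by rw [h0]; simp)]
    exact ih (fun i hi => h i (List.mem_cons_of_mem _ hi))

-- once the maximum is reached, B's scan is the min-dist first-wins fold over the candidates
theorem lexfold_filter (c : Nat → Nat) (M : Nat) (pos : Int) (hM : 0 < M) :
    ∀ (l : List Nat) (b : Nat), (∀ i ∈ l, c i ≤ M) →
      (l.foldl (fun (st : Int × Int × Int) i =>
          if ((c i : Int) > st.2.1 ∨ ((c i : Int) = st.2.1 ∧ (c i : Int) > 0 ∧ |(i : Int) - pos| < st.2.2)) then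
            ((i : Int), (c i : Int), |(i : Int) - pos|)
          else st) (((b : Nat) : Int), (M : Int), |(b : Int) - pos|))
        = ((((l.filter (fun i => c i == M)).foldl
              (fun (b i : Nat) => if |(i : Int) - pos| < |(b : Int) - pos| then i else b) b : Nat) : Int),
           (M : Int),
           |(((l.filter (fun i => c i == M)).foldl
              (fun (b i : Nat) => if |(i : Int) - pos| < |(b : Int) - pos| then i else b) b : Nat) : Int) - pos|) := by
  intro l
  induction l with
  | nil => intro b _; rfl
  | cons a l ih =>
    intro b h
    have ha : c a ≤ M := h a (List.mem_cons_self ..)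
    have htl : ∀ i ∈ l, c i ≤ M := fun i hi => h i (List.mem_cons_of_mem _ hi)
    simp only [List.foldl_cons]
    by_cases hca : c a = M
    · have hf : (a :: l).filter (fun i => c i == M) = a :: l.filter (fun i => c i == M) := by
        simp [hca]
      rw [hf]
      simp only [List.foldl_cons]
      by_cases hd : |(a : Int) - pos| < |(b : Int) - pos|
      · have hcast : ((c a : Nat) : Int) = (M : Int) := by exact_mod_cast hca
        rw [if_pos (Or.inr ⟨hcast, by rw [hcast]; exact_mod_cast hM, hd⟩), if_pos hd, hcast]
        exact ih a htl
      · rw [if_neg ?_, if_neg hd]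
        · exact ih b htl
        · rintro (hgt | ⟨_, _, hlt⟩)
          · have hle : ((c a : Nat) : Int) ≤ (M : Int) := by exact_mod_cast ha
            omega
          · exact hd hlt
    · have hf : (a :: l).filter (fun i => c i == M) = l.filter (fun i => c i == M) := by
        simp [hca]
      rw [hf, if_neg ?_]
      · exact ih b htl
      · rintro (hgt | ⟨heq, _, _⟩)
        · have hlt : (M : Int) < ((c a : Nat) : Int) := hgt
          have : M < c a := by exact_mod_cast hlt
          omega
        · exact hca (by exact_mod_cast heq)

-- running Int max of cast counts is the cast of the running Nat max
theorem foldl_max_cast (c : Nat → Nat) :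
    ∀ (l : List Nat) (a : Nat),
      l.foldl (fun x i => max x ((c i : Int))) ((a : Nat) : Int)
        = ((l.foldl (fun x i => max x (c i)) a : Nat) : Int) := by
  intro l
  induction l with
  | nil => intro a; rfl
  | cons x l ih =>
    intro a
    simp only [List.foldl_cons]
    rw [← Nat.cast_max, ih]

theorem natmax_lt (c : Nat → Nat) (M : Nat) :
    ∀ (l : List Nat) (a : Nat), a < M → (∀ i ∈ l, c i < M) →
      l.foldl (fun x i => max x (c i)) a < M := by
  intro l
  induction l with
  | nil => intro a ha _; exact ha
  | cons x l ih =>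
    intro a ha h
    simp only [List.foldl_cons]
    exact ih _ (by have := h x (List.mem_cons_self ..); omega)
      (fun i hi => h i (List.mem_cons_of_mem _ hi))

-- ===== VERDICT (by name: the statement is the Claim_ definition above) =====
theorem position_corrector_spec : Claim_equal_position_corrector := by
  intro pos w chunk _
  unfold Spec_position_corrector position_corrector position_corrector_alt
  dsimp only
  have hpc : ∀ i, i < chunk.length → pcInner chunk w i 0 = pcCount w chunk i := by
    intro i hi
    rw [pcInner_eq chunk w i 0 hi, Nat.zero_add, pcCount]
  set c := fun i => pcCount w chunk i with hc
  have hcong1 :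
      (List.range chunk.length).foldl (fun (st : Nat × Nat) i =>
          if pcInner chunk w i 0 > st.2 then (i, pcInner chunk w i 0) else st) (0, 0)
        = (List.range chunk.length).foldl (fun (st : Nat × Nat) i =>
            if c i > st.2 then (i, c i) else st) (0, 0) := by
    apply PySem.List.foldl_congr_mem
    intro st i hi
    rw [hpc i (List.mem_range.mp hi)]
  rw [hcong1]
  set s1 := (List.range chunk.length).foldl (fun (st : Nat × Nat) i =>
      if c i > st.2 then (i, c i) else st) (0, 0) with hs1
  have hs12 : s1.2 = (List.range chunk.length).foldl (fun a i => max a (c i)) 0 := by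
    rw [hs1]; exact foldl_f1_snd _ _ _
  set M := (List.range chunk.length).foldl (fun a i => max a (c i)) 0 with hM
  have hcongB :
      (List.range chunk.length).foldl (fun (st : Int × Int × Int) i =>
          if ((pcVotes w chunk).getD i 0 > st.2.1 ∨
              ((pcVotes w chunk).getD i 0 = st.2.1 ∧ (pcVotes w chunk).getD i 0 > 0 ∧ |(i : Int) - pos| < st.2.2)) then
            ((i : Int), (pcVotes w chunk).getD i 0, |(i : Int) - pos|)
          else st) ((-1 : Int), (0 : Int), (0 : Int))
        = (List.range chunk.length).foldl (fun (st : Int × Int × Int) i =>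
            if ((c i : Int) > st.2.1 ∨ ((c i : Int) = st.2.1 ∧ (c i : Int) > 0 ∧ |(i : Int) - pos| < st.2.2)) then
              ((i : Int), (c i : Int), |(i : Int) - pos|)
            else st) ((-1 : Int), (0 : Int), (0 : Int)) := by
    apply PySem.List.foldl_congr_mem
    intro st i hi
    rw [pcVotes_getD w chunk i (List.mem_range.mp hi)]
  rw [hcongB]
  by_cases hM0 : M = 0
  · rw [hs12, if_pos hM0]
    have hall0 : ∀ i ∈ List.range chunk.length, c i = 0 := by
      intro i hi
      have := foldl_max_mem_le c (List.range chunk.length) 0 i hi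
      omega
    rw [lexfold_zero c pos (List.range chunk.length) hall0]
  · rw [hs12, if_neg hM0]
    have hMpos : 0 < M := Nat.pos_of_ne_zero hM0
    have hpair : (List.range chunk.length).foldl (fun (st : Nat × Nat) i =>
        if c i > st.2 then (i, c i) else st) (0, 0) = (s1.1, M) := by
      rw [← hs1]
      exact Prod.ext rfl hs12
    obtain ⟨hcp, l₁, l₂, hdec, hsm⟩ :=
      foldl_f1_first c (List.range chunk.length) (0, 0) s1.1 M hpair hMpos
    have hle_all : ∀ i ∈ List.range chunk.length, c i ≤ M :=
      fun i hi => foldl_max_mem_le c (List.range chunk.length) 0 i hi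
    have hl2le : ∀ i ∈ l₂, c i ≤ M := by
      intro i hi
      exact hle_all i (by rw [hdec]; exact List.mem_append_right _ (List.mem_cons_of_mem _ hi))
    have hfval : (List.range chunk.length).filter (fun i => c i == M)
        = s1.1 :: l₂.filter (fun i => c i == M) := by
      rw [hdec, List.filter_append, List.filter_cons]
      have h1 : l₁.filter (fun i => c i == M) = [] := by
        apply List.filter_eq_nil_iff.mpr
        intro i hi
        simp only [beq_iff_eq]
        have := hsm i hi; omega
      have h2 : (c s1.1 == M) = true := beq_iff_eq.mpr hcp
      rw [h1, h2]; rfl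
    have hcong2 :
        (List.range chunk.length).foldl (fun (st : Nat × Int) i =>
            if pcInner chunk w i 0 = M then
              (if |(i : Int) - pos| < st.2 then (i, |(i : Int) - pos|) else st)
            else st) (s1.1, |(s1.1 : Int) - pos|)
          = (List.range chunk.length).foldl (fun (st : Nat × Int) i =>
              if c i = M then
                (if |(i : Int) - pos| < st.2 then (i, |(i : Int) - pos|) else st)
              else st) (s1.1, |(s1.1 : Int) - pos|) := by
      apply PySem.List.foldl_congr_mem
      intro st i hi
      rw [hpc i (List.mem_range.mp hi)]
    rw [hcong2, foldl_f2_filter c M pos (List.range chunk.length) s1.1, hfval]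
    simp only [List.foldl_cons]
    rw [if_neg (lt_irrefl |(s1.1 : Int) - pos|)]
    rw [hdec, List.foldl_append, List.foldl_cons]
    set st₁ := l₁.foldl (fun (st : Int × Int × Int) i =>
        if ((c i : Int) > st.2.1 ∨ ((c i : Int) = st.2.1 ∧ (c i : Int) > 0 ∧ |(i : Int) - pos| < st.2.2)) then
          ((i : Int), (c i : Int), |(i : Int) - pos|)
        else st) ((-1 : Int), (0 : Int), (0 : Int)) with hst₁
    have hst₁snd : st₁.2.1 = ((l₁.foldl (fun x i => max x (c i)) 0 : Nat) : Int) := by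
      rw [hst₁, lexfold_snd]
      have h00 : (((-1 : Int), (0 : Int), (0 : Int)) : Int × Int × Int).2.1 = ((0 : Nat) : Int) := by norm_num
      rw [h00, foldl_max_cast]
    have hm1lt : l₁.foldl (fun x i => max x (c i)) 0 < M :=
      natmax_lt c M l₁ 0 hMpos hsm
    have hstep : ((c s1.1 : Int) > st₁.2.1 ∨
        ((c s1.1 : Int) = st₁.2.1 ∧ (c s1.1 : Int) > 0 ∧ |(s1.1 : Int) - pos| < st₁.2.2)) := by
      left
      rw [hst₁snd, hcp]
      exact_mod_cast hm1lt
    rw [if_pos hstep]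
    have hcpc : ((c s1.1 : Nat) : Int) = (M : Int) := by exact_mod_cast hcp
    rw [hcpc, lexfold_filter c M pos hMpos l₂ s1.1 hl2le]
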